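-- pv_equiv track=rewrite | github.com/arcesoftware/Sequences | Lucas and more.py | generate_cantor_data
-- ===== SOURCE A (Python) =====
-- def generate_cantor_data(rows):
--     data = [[0, 0, 1]]
--     current_label = 2
--     for row in range(1, rows):
--         new_row = []
--         for element in range(3 ** row):
--             if element % 3 == 1:  # Removed segment
--                 new_row.append([row, element, 0])
--             else:  # Remaining segment
--                 new_row.append([row, element, current_label])
--                 current_label += 1
--         data.extend(new_row)
--     return data
-- ===== SOURCE B (Python) =====
-- def generate_cantor_data(rows):
--     # Stateless: each element's label is computed in closed form instead of
--     # threading a running counter through nested loops.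
--     return [[0, 0, 1]] + [
--         [row, e, 0] if e % 3 == 1
--         else [row, e, 1 + 3 ** (row - 1) + e - (e + 1) // 3]
--         for row in range(1, rows)
--         for e in range(3 ** row)
--     ]
-- ===== Notes on version B (the rewrite author's own statement) =====
-- stated objective: alternative
-- what changed: B drops the running current_label counter threaded through the nested loops and instead builds the flat list in one comprehension, computing each element's label in closed form (1 + 3**(row-1) + element - (element+1)//3).
import Mathlib
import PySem

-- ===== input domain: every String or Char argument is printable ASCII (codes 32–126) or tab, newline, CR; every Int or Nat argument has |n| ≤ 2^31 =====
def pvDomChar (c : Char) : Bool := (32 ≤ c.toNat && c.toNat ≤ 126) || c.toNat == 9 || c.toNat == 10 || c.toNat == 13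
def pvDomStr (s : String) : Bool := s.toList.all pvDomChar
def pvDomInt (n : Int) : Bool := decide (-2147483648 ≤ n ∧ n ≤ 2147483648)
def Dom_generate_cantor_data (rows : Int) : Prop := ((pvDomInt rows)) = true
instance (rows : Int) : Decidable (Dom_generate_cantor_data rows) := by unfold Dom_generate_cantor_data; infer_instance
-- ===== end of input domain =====

-- B replaces A's running label counter by a per-element closed-form label inside a single
-- comprehension (alternative decomposition; same asymptotic cost).

-- ===== PORT A =====
-- literal port of A: nested foldl threading (data, current_label)
def generate_cantor_data (rows : Int) : List (List Int) :=
  let st :=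
    (PySem.List.pyRange 1 rows 1).foldl
      (fun (st : List (List Int) × Int) row =>
        let inner :=
          (PySem.List.pyRange 0 ((3:Int) ^ row.toNat) 1).foldl
            (fun (st2 : List (List Int) × Int) element =>
              if PySem.Int.mod element 3 == 1 then
                (st2.1 ++ [[row, element, 0]], st2.2)
              else
                (st2.1 ++ [[row, element, st2.2]], st2.2 + 1))
            ([], st.2)
        (st.1 ++ inner.1, inner.2))
      ([[0, 0, 1]], 2)
  st.1

-- ===== PORT B =====
-- literal port of Source B: one comprehension, label in closed form
def generate_cantor_data_alt (rows : Int) : List (List Int) :=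
  [[0, 0, 1]] ++
    (PySem.List.pyRange 1 rows 1).flatMap (fun row =>
      (PySem.List.pyRange 0 ((3:Int) ^ row.toNat) 1).map (fun e =>
        if PySem.Int.mod e 3 == 1 then [row, e, 0]
        else [row, e, 1 + (3:Int) ^ (row - 1).toNat + e - PySem.Int.floordiv (e + 1) 3]))

-- ===== PRECONDITION & SPEC =====
def Spec_generate_cantor_data (rows : Int) (out : List (List Int)) : Prop := out = generate_cantor_data_alt rows
instance (rows : Int) (out : List (List Int)) : Decidable (Spec_generate_cantor_data rows out) := by unfold Spec_generate_cantor_data; infer_instance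

-- ===== CLAIM (what is proved, stated in full; the proofs are below) =====
def Claim_equal_generate_cantor_data : Prop := ∀ (rows : Int), Dom_generate_cantor_data rows → Spec_generate_cantor_data rows (generate_cantor_data rows)

-- ===== LEMMAS AND PROOFS =====

-- the inner loop of A, named for the proofs
def cantorInner (row : Int) (st2 : List (List Int) × Int) (element : Int) : List (List Int) × Int :=
  if PySem.Int.mod element 3 == 1 then
    (st2.1 ++ [[row, element, 0]], st2.2)
  else
    (st2.1 ++ [[row, element, st2.2]], st2.2 + 1)

-- A's inner fold over range(N) from counter c: appends the closed-form row, counter becomes c + N - (N+1)//3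
theorem cantorInner_fold (row c : Int) (acc : List (List Int)) (N : Nat) :
    (PySem.List.pyRange 0 (N : Int) 1).foldl (cantorInner row) (acc, c) =
      (acc ++ (PySem.List.pyRange 0 (N : Int) 1).map (fun e =>
          if PySem.Int.mod e 3 == 1 then [row, e, 0]
          else [row, e, c + e - PySem.Int.floordiv (e + 1) 3]),
        c + N - ((N : Int) + 1) / 3) := by
  induction N with
  | zero => simp [PySem.List.pyRange_one_eq_nil]
  | succ n ih =>
    have h : PySem.List.pyRange 0 ((n : Int) + 1) 1
        = PySem.List.pyRange 0 (n : Int) 1 ++ [(n : Int)] :=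
      PySem.List.pyRange_one_succ_right (by positivity)
    push_cast
    rw [h, List.foldl_append, ih, List.map_append]
    simp only [List.foldl_cons, List.foldl_nil, List.map_cons, List.map_nil]
    have hmod : PySem.Int.mod (n : Int) 3 = (n : Int) % 3 :=
      PySem.Int.mod_eq_emod_of_pos (by norm_num)
    have hfd : PySem.Int.floordiv ((n : Int) + 1) 3 = ((n : Int) + 1) / 3 :=
      PySem.Int.floordiv_eq_ediv_of_pos (by norm_num)
    simp only [cantorInner, hmod]
    by_cases hm : (n : Int) % 3 = 1
    · simp only [hm, beq_self_eq_true, if_true]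
      refine Prod.ext (by simp) ?_
      simp only
      omega
    · have : ((n : Int) % 3 == 1) = false := by simpa using hm
      simp only [this, Bool.false_eq_true, if_false]
      refine Prod.ext (by simp) ?_
      simp only
      omega

-- outer loop: after processing rows 1..n, counter is 1 + 3^n and data is the flat closed-form list
theorem cantor_outer (n : Nat) :
    (PySem.List.pyRange 1 (1 + (n : Int)) 1).foldl
        (fun (st : List (List Int) × Int) row =>
          let inner :=
            (PySem.List.pyRange 0 ((3:Int) ^ row.toNat) 1).foldl (cantorInner row) ([], st.2)
          (st.1 ++ inner.1, inner.2))
        ([[0, 0, 1]], 2) =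
      ([[0, 0, 1]] ++
        (PySem.List.pyRange 1 (1 + (n : Int)) 1).flatMap (fun row =>
          (PySem.List.pyRange 0 ((3:Int) ^ row.toNat) 1).map (fun e =>
            if PySem.Int.mod e 3 == 1 then [row, e, 0]
            else [row, e, 1 + (3:Int) ^ (row - 1).toNat + e - PySem.Int.floordiv (e + 1) 3])),
        1 + (3:Int) ^ n) := by
  induction n with
  | zero => simp [PySem.List.pyRange_one_eq_nil]
  | succ n ih =>
    have h : PySem.List.pyRange 1 (1 + ((n : Int) + 1)) 1
        = PySem.List.pyRange 1 (1 + (n : Int)) 1 ++ [1 + (n : Int)] := by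
      have := PySem.List.pyRange_one_succ_right (a := 1) (b := 1 + (n : Int)) (by omega)
      rw [← this]; ring_nf
    push_cast
    rw [h, List.foldl_append, List.flatMap_append, ih]
    simp only [List.foldl_cons, List.foldl_nil, List.flatMap_cons, List.flatMap_nil,
      List.append_nil]
    have htn : ((1 : Int) + (n : Int)).toNat = n + 1 := by omega
    have htn' : ((1 : Int) + (n : Int) - 1).toNat = n := by omega
    have hcast : ((3:Int) ^ ((1 : Int) + (n : Int)).toNat) = ((3 ^ (n+1) : Nat) : Int) := by
      rw [htn]; push_cast; ring
    rw [hcast, cantorInner_fold]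
    refine Prod.ext ?_ ?_
    · simp only [List.append_assoc, List.append_cancel_left_eq]
      rw [htn']
      simp
    · simp only
      have h3 : ((3 ^ (n+1) : Nat) : Int) = 3 * 3 ^ n := by push_cast; ring
      rw [h3]
      have : (3 * (3:Int) ^ n + 1) / 3 = 3 ^ n := by omega
      rw [this]
      ring

-- ===== VERDICT (by name: the statement is the Claim_ definition above) =====
theorem generate_cantor_data_spec : Claim_equal_generate_cantor_data := by
  intro rows _
  unfold Spec_generate_cantor_data generate_cantor_data generate_cantor_data_alt
  by_cases hle : rows ≤ 1
  · rw [PySem.List.pyRange_one_eq_nil hle]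
    simp
  · have hrows : rows = 1 + (((rows - 1).toNat : Nat) : Int) := by omega
    rw [hrows]
    exact congrArg Prod.fst (cantor_outer (rows - 1).toNat)
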